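-- pv_equiv track=rewrite | github.com/orioncrocker/spotify_images | collage.py | get_closest_resolution
-- ===== SOURCE A (Python) =====
-- ratio_by_resolution = {
--     "4:3":   [(800,600),(1024,768),(1280,960)],
--     "16:9":  [(1280,720),(1600,900),(1920,1080),(2560,1440),(3840,2160),(5120,2880),(7680,4320)],
--     "16:10": [(1280,800),(1440,900),(1680,1050),(1920,1200),(2560,1600),(3840,2400)],
--     "32:9":  [(3840,1080),(5120,1400),(6400,1800),(7680,2160)],
-- }
--
-- def get_closest_resolution(ratio, x_size, y_size):
--   resolutions = ratio_by_resolution[ratio]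
--   closest_x = resolutions[0][0]
--   idx = 0
--   for x,y in resolutions:
--     x1_diff = x_size - closest_x
--     x2_diff = x_size - x
--
--     if x2_diff < 0:
--       # Resolutions higher than current are disqualified!
--       break
--
--     if (x2_diff < x1_diff):
--       closest_x = x
--       idx += 1
--
--   closest_y = resolutions[idx][1]
--   return closest_x, closest_y
-- ===== SOURCE B (Python) =====
-- ratio_by_resolution = {
--     "4:3":   [(800,600),(1024,768),(1280,960)],
--     "16:9":  [(1280,720),(1600,900),(1920,1080),(2560,1440),(3840,2160),(5120,2880),(7680,4320)],
--     "16:10": [(1280,800),(1440,900),(1680,1050),(1920,1200),(2560,1600),(3840,2400)],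
--     "32:9":  [(3840,1080),(5120,1400),(6400,1800),(7680,2160)],
-- }
--
-- def get_closest_resolution(ratio, x_size, y_size):
--     # binary search (bisect_right by x) over the sorted resolution list,
--     # clamped to index 0 when x_size is below every resolution
--     resolutions = ratio_by_resolution[ratio]
--     lo, hi = 0, len(resolutions)
--     while lo < hi:
--         mid = (lo + hi) // 2
--         if resolutions[mid][0] <= x_size:
--             lo = mid + 1
--         else:
--             hi = mid
--     idx = lo - 1 if lo > 0 else 0
--     return resolutions[idx][0], resolutions[idx][1]
-- ===== Notes on version B (the rewrite author's own statement) =====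
-- stated objective: alternative
-- what changed: Replaces the running-best linear scan with break (and its separately maintained idx counter) by a hand-written bisect_right binary search over the sorted resolution list, clamping the index to 0 when x_size is below every resolution.
import Mathlib
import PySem

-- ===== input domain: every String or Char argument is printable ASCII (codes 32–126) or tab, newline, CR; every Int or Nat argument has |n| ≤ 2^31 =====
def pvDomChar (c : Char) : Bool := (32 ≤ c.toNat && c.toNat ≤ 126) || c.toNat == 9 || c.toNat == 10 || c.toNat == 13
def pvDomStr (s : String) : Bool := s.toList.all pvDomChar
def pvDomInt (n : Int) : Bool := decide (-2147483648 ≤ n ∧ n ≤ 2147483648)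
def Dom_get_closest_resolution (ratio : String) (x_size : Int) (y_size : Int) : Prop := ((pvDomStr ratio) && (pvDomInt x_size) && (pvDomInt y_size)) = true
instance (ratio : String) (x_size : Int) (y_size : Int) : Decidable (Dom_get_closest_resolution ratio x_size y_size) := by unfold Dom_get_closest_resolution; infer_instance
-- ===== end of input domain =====

-- ===== PORT A =====
-- B replaces A's linear scan+break by a binary search over the same sorted table (alternative decomposition).
-- the module-level table ratio_by_resolution, shared context of both programs
def pvRatioTable : PySem.Dict String (List (Int × Int)) :=
  PySem.Dict.ofList [
    ("4:3",   [(800,600),(1024,768),(1280,960)]),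
    ("16:9",  [(1280,720),(1600,900),(1920,1080),(2560,1440),(3840,2160),(5120,2880),(7680,4320)]),
    ("16:10", [(1280,800),(1440,900),(1680,1050),(1920,1200),(2560,1600),(3840,2400)]),
    ("32:9",  [(3840,1080),(5120,1400),(6400,1800),(7680,2160)])]

-- A's for-loop with break: carries (closest_x, idx); returns them when the loop breaks or ends
def pvLoopA (x_size : Int) : List (Int × Int) → Int → Int → Int × Int
  | [], closest_x, idx => (closest_x, idx)
  | (x, _y) :: rest, closest_x, idx =>
    if x_size - x < 0 then (closest_x, idx)
    else if x_size - x < x_size - closest_x then pvLoopA x_size rest x (idx + 1)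
    else pvLoopA x_size rest closest_x idx

def get_closest_resolution (ratio : String) (x_size : Int) (y_size : Int) : Int × Int :=
  match PySem.Dict.get? pvRatioTable ratio with
  | none => (0, 0)  -- Python raises KeyError; excluded by Pre_
  | some resolutions =>
    match PySem.List.pyGet? resolutions 0 with
    | none => (0, 0)  -- unreachable: all table entries are nonempty
    | some r0 =>
      let p := pvLoopA x_size resolutions r0.1 0
      match PySem.List.pyGet? resolutions p.2 with
      | none => (0, 0)
      | some r => (p.1, r.2)

-- ===== PORT B =====
-- the while-loop of Source B: bisect_right by first component; fuel = list length bounds the iterations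
def pvBisectB (resolutions : List (Int × Int)) (x_size : Int) (fuel : Nat) (lo hi : Int) : Int :=
  if _h : fuel = 0 then lo  -- fuel only bounds the iteration count; the loop itself stops at lo ≥ hi
  else if lo < hi then
    let mid := PySem.Int.floordiv (lo + hi) 2
    match PySem.List.pyGet? resolutions mid with
    | none => lo  -- unreachable: 0 ≤ lo ≤ mid < hi ≤ length
    | some r =>
      if r.1 ≤ x_size then pvBisectB resolutions x_size (fuel - 1) (mid + 1) hi
      else pvBisectB resolutions x_size (fuel - 1) lo mid
  else lo
termination_by fuel
decreasing_by all_goals omega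

def get_closest_resolution_alt (ratio : String) (x_size : Int) (y_size : Int) : Int × Int :=
  match PySem.Dict.get? pvRatioTable ratio with
  | none => (0, 0)  -- Python raises KeyError; excluded by Pre_
  | some resolutions =>
    let lo := pvBisectB resolutions x_size resolutions.length 0 (resolutions.length : Int)
    let idx := if lo > 0 then lo - 1 else 0
    match PySem.List.pyGet? resolutions idx with
    | none => (0, 0)
    | some r => (r.1, r.2)

-- ===== PRECONDITION & SPEC =====
-- Pre_ excludes exactly the ratios absent from the table, on which Python A raises KeyError.
def Pre_get_closest_resolution (ratio : String) (x_size : Int) (y_size : Int) : Prop :=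
  ratio = "4:3" ∨ ratio = "16:9" ∨ ratio = "16:10" ∨ ratio = "32:9"
instance (ratio : String) (x_size : Int) (y_size : Int) : Decidable (Pre_get_closest_resolution ratio x_size y_size) := by unfold Pre_get_closest_resolution; infer_instance

def pvWitness_get_closest_resolution : String × Int × Int := ("16:9", 1700, 1000)

def Spec_get_closest_resolution (ratio : String) (x_size : Int) (y_size : Int) (out : Int × Int) : Prop := out = get_closest_resolution_alt ratio x_size y_size
instance (ratio : String) (x_size : Int) (y_size : Int) (out : Int × Int) : Decidable (Spec_get_closest_resolution ratio x_size y_size out) := by unfold Spec_get_closest_resolution; infer_instance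

-- ===== CLAIM (what is proved, stated in full; the proofs are below) =====
def Claim_equal_get_closest_resolution : Prop := ∀ (ratio : String) (x_size : Int) (y_size : Int), Dom_get_closest_resolution ratio x_size y_size → Pre_get_closest_resolution ratio x_size y_size → Spec_get_closest_resolution ratio x_size y_size (get_closest_resolution ratio x_size y_size)

-- ===== LEMMAS AND PROOFS =====

-- ===== VERDICT (by name: the statement is the Claim_ definition above) =====
theorem pvGet_43 : PySem.Dict.get? pvRatioTable "4:3" = some [(800,600),(1024,768),(1280,960)] := by decide
theorem pvGet_169 : PySem.Dict.get? pvRatioTable "16:9" = some [(1280,720),(1600,900),(1920,1080),(2560,1440),(3840,2160),(5120,2880),(7680,4320)] := by decide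
theorem pvGet_1610 : PySem.Dict.get? pvRatioTable "16:10" = some [(1280,800),(1440,900),(1680,1050),(1920,1200),(2560,1600),(3840,2400)] := by decide
theorem pvGet_329 : PySem.Dict.get? pvRatioTable "32:9" = some [(3840,1080),(5120,1400),(6400,1800),(7680,2160)] := by decide
set_option maxHeartbeats 4000000 in
theorem get_closest_resolution_spec : Claim_equal_get_closest_resolution := by
  intro ratio x_size y_size _ hpre
  unfold Spec_get_closest_resolution
  rcases hpre with h | h | h | h <;> subst h <;>
    simp only [get_closest_resolution, get_closest_resolution_alt,
      pvGet_43, pvGet_169, pvGet_1610, pvGet_329] <;>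
    simp [pvLoopA, pvBisectB, PySem.Int.floordiv, sub_lt_sub_iff_left, sub_neg] <;>
    split_ifs <;> first | rfl | decide | omega
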